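-- pv_equiv track=rewrite | github.com/bobrenjc93/tlhub | src/tlhub/view_helpers.py | _build_python_kernel_to_lines_map
-- ===== SOURCE A (Python) =====
-- from collections import defaultdict
--
-- def _build_python_kernel_to_lines_map(
--     content: str,
--     kernel_names: list[str],
-- ) -> dict[str, list[int]]:
--     content = "\n".join(line for line in content.splitlines() if line or content)
--     lines = content.splitlines()
--     kernel_to_lines: dict[str, list[int]] = defaultdict(list)
--     if not lines:
--         return {}
--
--     run_impl_line = next(
--         (
--             index
--             for index, line in enumerate(lines)
--             if "def" in line and "call" in line and "(args)" in line
--         ),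
--         0,
--     )
--     first_line_number = next((index for index, line in enumerate(lines) if "# AOT ID:" in line), 0)
--
--     for kernel_name in kernel_names:
--         pure_kernel_name = kernel_name.split(":", 1)[0]
--         found = False
--         if ":" in kernel_name:
--             for index, line in enumerate(lines[run_impl_line:], start=run_impl_line):
--                 if kernel_name in line:
--                     for probe_index, probe_line in enumerate(lines[index + 1 :], start=index + 1):
--                         if pure_kernel_name in probe_line:
--                             kernel_to_lines[kernel_name].append(
--                                 probe_index + 1 - first_line_number
--                             )
--                             found = True
--                             break
--                     break
--         if found:
--             continue
--         for index, line in enumerate(lines[run_impl_line:], start=run_impl_line):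
--             if pure_kernel_name in line:
--                 kernel_to_lines[kernel_name].append(index + 1 - first_line_number)
--     return dict(kernel_to_lines)
-- ===== SOURCE B (Python) =====
-- def _build_python_kernel_to_lines_map(content, kernel_names):
--     # Same line normalization as A: join/splitlines (drops one trailing empty line).
--     lines = "\n".join(content.splitlines()).splitlines()
--     if not lines:
--         return {}
--     # Occurrence index: ONE pass over the lines records, per distinct needle,
--     # the indices of the lines containing it; the anchors are found in the same pass.
--     occ = {}
--     for name in kernel_names:
--         occ[name.split(":", 1)[0]] = []
--         if ":" in name:
--             occ[name] = []
--     run = None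
--     base = None
--     for i, line in enumerate(lines):
--         if run is None and "def" in line and "call" in line and "(args)" in line:
--             run = i
--         if base is None and "# AOT ID:" in line:
--             base = i
--         for n in occ:
--             if n in line:
--                 occ[n].append(i)
--     if run is None:
--         run = 0
--     if base is None:
--         base = 0
--     # Answer every kernel from the index alone.
--     result = {}
--     for name in kernel_names:
--         pure = name.split(":", 1)[0]
--         hits = None
--         if ":" in name:
--             full = next((i for i in occ[name] if i >= run), None)
--             if full is not None:
--                 j = next((i for i in occ[pure] if i > full), None)
--                 if j is not None:
--                     hits = [j + 1 - base]
--         if hits is None: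
--             hits = [i + 1 - base for i in occ[pure] if i >= run]
--         if hits:
--             result.setdefault(name, []).extend(hits)
--     return result
-- ===== Notes on version B (the rewrite author's own statement) =====
-- stated objective: alternative
-- what changed: A rescans the whole line list once (or twice, for the colon probe) per kernel name; B makes ONE line-major pass that records, for every distinct needle, the indices of the lines containing it (plus both anchor lines), and then answers each kernel name purely from that occurrence index.
import Mathlib
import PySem

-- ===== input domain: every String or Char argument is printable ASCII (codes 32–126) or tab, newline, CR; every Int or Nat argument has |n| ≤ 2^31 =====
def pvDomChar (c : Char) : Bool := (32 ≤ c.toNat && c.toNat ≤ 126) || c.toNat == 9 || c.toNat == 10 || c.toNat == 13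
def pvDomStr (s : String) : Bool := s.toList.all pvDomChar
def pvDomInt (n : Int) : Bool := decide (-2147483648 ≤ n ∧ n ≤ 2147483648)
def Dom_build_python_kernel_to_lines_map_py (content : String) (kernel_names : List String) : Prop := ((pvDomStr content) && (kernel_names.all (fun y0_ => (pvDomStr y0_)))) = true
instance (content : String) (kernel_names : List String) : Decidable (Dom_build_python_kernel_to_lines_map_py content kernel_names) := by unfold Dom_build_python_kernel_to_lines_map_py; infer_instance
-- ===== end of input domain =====

-- B replaces A's per-kernel rescans of the line list by a single line-major pass that
-- builds an occurrence index (needle -> line indices) once and answers every kernel from it.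

-- kernel_name.split(":", 1)[0] : the segment before the first ':' (used by both programs)
def pvPure (name : String) : String := ((PySem.Str.split? name ":").getD []).headD ""

-- ===== PORT A =====
-- 'next((index for index, line in enumerate(...) if P(line)), default)' : first matching index
def pvFindIdx (p : String → Bool) : List (Int × String) → Option Int
  | [] => none
  | (i, l) :: rest => if p l then some i else pvFindIdx p rest

-- body of A's non-colon collection loop ('if pure in line: kernel_to_lines[name].append(...)')
def pvCollectStep (kernel_name pure_kernel_name : String) (first_line_number : Int)
    (d : PySem.Dict String (List Int)) (il : Int × String) : PySem.Dict String (List Int) :=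
  if PySem.Str.isIn pure_kernel_name il.2
    then d.insert kernel_name (d.getD kernel_name [] ++ [il.1 + 1 - first_line_number])
    else d

-- A's colon probe: after the first line containing the full name, find the next line with the pure name
def pvColonFound (lines : List String) (first_line_number : Int) (pure_kernel_name : String) :
    Option Int → Option Int
  | some index =>
    (pvFindIdx (fun line => PySem.Str.isIn pure_kernel_name line)
      (PySem.List.enumerate (PySem.List.slice lines (some (index + 1)) none) (index + 1))).map
      (fun probe_index => probe_index + 1 - first_line_number)
  | none => none

-- 'if found: continue' / otherwise run the collection loop
def pvFoundDispatch (lines : List String) (run_impl_line first_line_number : Int)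
    (kernel_name pure_kernel_name : String) (d : PySem.Dict String (List Int)) :
    Option Int → PySem.Dict String (List Int)
  | some v => d.insert kernel_name (d.getD kernel_name [] ++ [v])
  | none =>
    (PySem.List.enumerate (PySem.List.slice lines (some run_impl_line) none) run_impl_line).foldl
      (pvCollectStep kernel_name pure_kernel_name first_line_number) d

-- body of A's loop over kernel_names
def pvKernelStepA (lines : List String) (run_impl_line first_line_number : Int)
    (d : PySem.Dict String (List Int)) (kernel_name : String) : PySem.Dict String (List Int) :=
  let pure_kernel_name := pvPure kernel_name
  let found : Option Int :=
    if PySem.Str.isIn ":" kernel_name then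
      pvColonFound lines first_line_number pure_kernel_name
        (pvFindIdx (fun line => PySem.Str.isIn kernel_name line)
          (PySem.List.enumerate (PySem.List.slice lines (some run_impl_line) none) run_impl_line))
    else none
  pvFoundDispatch lines run_impl_line first_line_number kernel_name pure_kernel_name d found

def build_python_kernel_to_lines_map_py (content : String) (kernel_names : List String) : List (String × List Int) :=
  -- content = "\n".join(line for line in content.splitlines() if line or content)
  let content1 := PySem.Str.join "\n" ((PySem.Str.splitlines content).filter
    (fun line => !(line == "") || !(content == "")))
  let lines := PySem.Str.splitlines content1
  if lines.isEmpty then [] else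
  let run_impl_line : Int := (pvFindIdx
    (fun line => PySem.Str.isIn "def" line && PySem.Str.isIn "call" line && PySem.Str.isIn "(args)" line)
    (PySem.List.enumerate lines 0)).getD 0
  let first_line_number : Int := (pvFindIdx (fun line => PySem.Str.isIn "# AOT ID:" line)
    (PySem.List.enumerate lines 0)).getD 0
  let d := kernel_names.foldl (pvKernelStepA lines run_impl_line first_line_number) PySem.Dict.empty
  d.items

-- ===== PORT B =====
-- registering the needles of one kernel name (values start empty)
def pvNeedleStep (occ : PySem.Dict String (List Int)) (name : String) : PySem.Dict String (List Int) :=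
  let occ := occ.insert (pvPure name) []
  if PySem.Str.isIn ":" name then occ.insert name [] else occ

-- one line of the single pass: the two anchors and the occurrence index
def pvRunStep (run? : Option Int) (il : Int × String) : Option Int :=
  if run?.isNone && (PySem.Str.isIn "def" il.2 && PySem.Str.isIn "call" il.2 && PySem.Str.isIn "(args)" il.2)
    then some il.1 else run?

def pvBaseStep (base? : Option Int) (il : Int × String) : Option Int :=
  if base?.isNone && PySem.Str.isIn "# AOT ID:" il.2 then some il.1 else base?

def pvOccLineStep (occ : PySem.Dict String (List Int)) (il : Int × String) : PySem.Dict String (List Int) :=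
  occ.keys.foldl (fun occ n => if PySem.Str.isIn n il.2 then occ.modify n [] (fun v => v ++ [il.1]) else occ) occ

def pvStStep (st : Option Int × Option Int × PySem.Dict String (List Int)) (il : Int × String) :
    Option Int × Option Int × PySem.Dict String (List Int) :=
  (pvRunStep st.1 il, pvBaseStep st.2.1 il, pvOccLineStep st.2.2 il)

-- B's colon lookup: first full-name occurrence at/after run, then first pure occurrence after it
def pvColonHit (occ : PySem.Dict String (List Int)) (base : Int) (pure : String) :
    Option Int → Option (List Int)
  | some full => ((occ.getD pure []).find? (fun i => decide (full < i))).map (fun j => [j + 1 - base])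
  | none => none

-- 'hits = hits0 if hits0 is not None else fallback comprehension'
def pvHitsOf (occ : PySem.Dict String (List Int)) (run base : Int) (pure : String) :
    Option (List Int) → List Int
  | some h => h
  | none => ((occ.getD pure []).filter (fun i => decide (run ≤ i))).map (fun i => i + 1 - base)

-- answering one kernel name from the occurrence index
def pvKernelStepB (occ : PySem.Dict String (List Int)) (run base : Int)
    (result : PySem.Dict String (List Int)) (name : String) : PySem.Dict String (List Int) :=
  let pure := pvPure name
  let hits0 : Option (List Int) :=
    if PySem.Str.isIn ":" name then
      pvColonHit occ base pure ((occ.getD name []).find? (fun i => decide (run ≤ i)))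
    else none
  let hits := pvHitsOf occ run base pure hits0
  if hits.isEmpty then result else result.insert name (result.getD name [] ++ hits)

def build_python_kernel_to_lines_map_py_alt (content : String) (kernel_names : List String) : List (String × List Int) :=
  let lines := PySem.Str.splitlines (PySem.Str.join "\n" (PySem.Str.splitlines content))
  if lines.isEmpty then [] else
  let occ0 := kernel_names.foldl pvNeedleStep PySem.Dict.empty
  let st := (PySem.List.enumerate lines 0).foldl pvStStep (none, none, occ0)
  let run : Int := st.1.getD 0
  let base : Int := st.2.1.getD 0
  let occ := st.2.2
  let result := kernel_names.foldl (pvKernelStepB occ run base) PySem.Dict.empty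
  result.items

-- ===== PRECONDITION & SPEC =====
def Spec_build_python_kernel_to_lines_map_py (content : String) (kernel_names : List String) (out : List (String × List Int)) : Prop := out = build_python_kernel_to_lines_map_py_alt content kernel_names
instance (content : String) (kernel_names : List String) (out : List (String × List Int)) : Decidable (Spec_build_python_kernel_to_lines_map_py content kernel_names out) := by unfold Spec_build_python_kernel_to_lines_map_py; infer_instance

-- ===== CLAIM (what is proved, stated in full; the proofs are below) =====
def Claim_equal_build_python_kernel_to_lines_map_py : Prop := ∀ (content : String) (kernel_names : List String), Dom_build_python_kernel_to_lines_map_py content kernel_names → Spec_build_python_kernel_to_lines_map_py content kernel_names (build_python_kernel_to_lines_map_py content kernel_names)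

-- ===== LEMMAS AND PROOFS =====

-- all line indices (from 0) whose line contains needle n, in order
def pvIdx (lines : List String) (n : String) : List Int :=
  (((PySem.List.enumerate lines 0).filter (fun il => PySem.Str.isIn n il.2)).map (·.1))

-- A's guard 'if line or content' never drops a line
theorem pv_filter_lines (content : String) :
    (PySem.Str.splitlines content).filter (fun line => !(line == "") || !(content == ""))
      = PySem.Str.splitlines content := by
  by_cases hc : content = ""
  · subst hc; decide
  · exact List.filter_eq_self.mpr (fun a _ => by simp [hc])

theorem pvFindIdx_eq (p : String → Bool) (l : List (Int × String)) :
    pvFindIdx p l = ((l.filter (fun il => p il.2)).map (·.1)).head? := by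
  induction l with
  | nil => rfl
  | cons il rest ih =>
    obtain ⟨i, s⟩ := il
    by_cases h : p s
    · simp [pvFindIdx, h]
    · simp [pvFindIdx, h, ih]

theorem pv_find?_eq {α : Type} (p : α → Bool) (l : List α) :
    l.find? p = (l.filter p).head? := by
  induction l with
  | nil => rfl
  | cons x rest ih =>
    by_cases h : p x
    · rw [List.find?_cons_of_pos h, List.filter_cons_of_pos h, List.head?_cons]
    · rw [List.find?_cons_of_neg h, List.filter_cons_of_neg h, ih]

theorem pv_scan_first (p : String → Bool) (l : List (Int × String)) (a : Option Int)
    (f : Option Int → (Int × String) → Option Int)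
    (hf : ∀ s il, f s il = if s.isNone && p il.2 then some il.1 else s) :
    l.foldl f a = (match a with | some x => some x | none => pvFindIdx p l) := by
  induction l generalizing a with
  | nil => cases a <;> rfl
  | cons il rest ih =>
    rw [List.foldl_cons, hf]
    cases a with
    | some x => simp [ih]
    | none =>
      by_cases h : p il.2
      · simp [h, ih, pvFindIdx]
      · simp [h, ih, pvFindIdx]

theorem pv_split_st (E : List (Int × String)) (a b : Option Int) (c : PySem.Dict String (List Int)) :
    E.foldl pvStStep (a, b, c) = (E.foldl pvRunStep a, E.foldl pvBaseStep b, E.foldl pvOccLineStep c) := by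
  induction E generalizing a b c with
  | nil => rfl
  | cons il rest ih => simp [List.foldl_cons, pvStStep, ih]

theorem pv_enum_fst_bounds (lines : List String) (s : Int) (il : Int × String)
    (h : il ∈ PySem.List.enumerate lines s) : s ≤ il.1 ∧ il.1 < s + lines.length := by
  rw [PySem.List.mem_enumerate_iff] at h
  obtain ⟨k, hk, rfl⟩ := h
  refine ⟨by simp, ?_⟩
  simp
  omega

theorem pv_idx_bounds (lines : List String) (n : String) (i : Int) (h : i ∈ pvIdx lines n) :
    0 ≤ i ∧ i < lines.length := by
  unfold pvIdx at h
  simp only [List.mem_map, List.mem_filter] at h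
  obtain ⟨il, ⟨hmem, _⟩, rfl⟩ := h
  have := pv_enum_fst_bounds lines 0 il hmem
  omega

theorem pv_idx_filter (lines : List String) (n : String) (r : Int) (h0 : 0 ≤ r)
    (hle : r.toNat ≤ lines.length) :
    (pvIdx lines n).filter (fun i => decide (r ≤ i))
      = ((PySem.List.enumerate (lines.drop r.toNat) r).filter (fun il => PySem.Str.isIn n il.2)).map (·.1) := by
  have htk : ((lines.take r.toNat).length : Int) = r := by
    simp [List.length_take, Nat.min_eq_left hle]; omega
  have hsplit : PySem.List.enumerate lines 0
      = PySem.List.enumerate (lines.take r.toNat) 0 ++ PySem.List.enumerate (lines.drop r.toNat) r := by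
    conv_lhs => rw [← List.take_append_drop r.toNat lines]
    rw [PySem.List.enumerate_append]
    congr 1
    rw [zero_add, htk]
  unfold pvIdx
  rw [hsplit, List.filter_append, List.map_append, List.filter_append]
  have h1 : (((PySem.List.enumerate (lines.take r.toNat) 0).filter (fun il => PySem.Str.isIn n il.2)).map (·.1)).filter (fun i => decide (r ≤ i)) = [] := by
    rw [List.filter_eq_nil_iff]
    intro i hi
    simp only [List.mem_map, List.mem_filter] at hi
    obtain ⟨il, ⟨hmem, _⟩, rfl⟩ := hi
    have hb := pv_enum_fst_bounds _ 0 il hmem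
    simp only [decide_eq_true_eq]
    omega
  have h2 : (((PySem.List.enumerate (lines.drop r.toNat) r).filter (fun il => PySem.Str.isIn n il.2)).map (·.1)).filter (fun i => decide (r ≤ i)) = ((PySem.List.enumerate (lines.drop r.toNat) r).filter (fun il => PySem.Str.isIn n il.2)).map (·.1) := by
    rw [List.filter_eq_self]
    intro i hi
    simp only [List.mem_map, List.mem_filter] at hi
    obtain ⟨il, ⟨hmem, _⟩, rfl⟩ := hi
    have hb := pv_enum_fst_bounds _ r il hmem
    simp only [decide_eq_true_eq]
    omega
  rw [h1, h2, List.nil_append]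

theorem pv_scan_drop (lines : List String) (n : String) (r : Int) (h0 : 0 ≤ r)
    (hle : r.toNat ≤ lines.length) :
    pvFindIdx (fun line => PySem.Str.isIn n line) (PySem.List.enumerate (lines.drop r.toNat) r)
      = ((pvIdx lines n).filter (fun i => decide (r ≤ i))).head? := by
  rw [pv_idx_filter lines n r h0 hle, pvFindIdx_eq]

theorem pv_anchor_bounds (lines : List String) (p : String → Bool) :
    0 ≤ ((pvFindIdx p (PySem.List.enumerate lines 0)).getD 0) ∧
      ((pvFindIdx p (PySem.List.enumerate lines 0)).getD 0).toNat ≤ lines.length := by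
  cases hf : pvFindIdx p (PySem.List.enumerate lines 0) with
  | none => simp
  | some i =>
    rw [pvFindIdx_eq] at hf
    have : i ∈ ((PySem.List.enumerate lines 0).filter (fun il => p il.2)).map (·.1) :=
      List.mem_of_mem_head? hf
    simp only [List.mem_map, List.mem_filter] at this
    obtain ⟨il, ⟨hmem, _⟩, rfl⟩ := this
    have hb := pv_enum_fst_bounds _ 0 il hmem
    constructor
    · simpa using hb.1
    · simp; omega

theorem pv_foldl_dict_append (k pure : String) (base : Int) (l : List (Int × String))
    (d : PySem.Dict String (List Int)) :
    l.foldl (pvCollectStep k pure base) d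
      = if ((l.filter (fun il => PySem.Str.isIn pure il.2)).map (fun il => il.1 + 1 - base)).isEmpty
          then d
          else d.insert k (d.getD k [] ++ ((l.filter (fun il => PySem.Str.isIn pure il.2)).map (fun il => il.1 + 1 - base))) := by
  induction l generalizing d with
  | nil => rfl
  | cons il rest ih =>
    rw [List.foldl_cons]
    by_cases h : PySem.Str.isIn pure il.2
    · have hf : (il :: rest).filter (fun il => PySem.Str.isIn pure il.2)
          = il :: rest.filter (fun il => PySem.Str.isIn pure il.2) := by
        simp only [List.filter_cons]; rw [if_pos h]
      have hstep : pvCollectStep k pure base d il = d.insert k (d.getD k [] ++ [il.1 + 1 - base]) := by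
        unfold pvCollectStep; rw [if_pos h]
      rw [hf, hstep, ih]
      simp only [List.map_cons, List.isEmpty_cons, Bool.false_eq_true, if_false]
      by_cases he : ((rest.filter (fun il => PySem.Str.isIn pure il.2)).map (fun il => il.1 + 1 - base)).isEmpty
      · rw [if_pos he, List.isEmpty_iff.mp he]
      · rw [if_neg he, PySem.Dict.getD_insert_self, PySem.Dict.insert_insert_self]
        simp
    · have hf : (il :: rest).filter (fun il => PySem.Str.isIn pure il.2)
          = rest.filter (fun il => PySem.Str.isIn pure il.2) := by
        simp only [List.filter_cons]; rw [if_neg h]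
      have hstep : pvCollectStep k pure base d il = d := by unfold pvCollectStep; rw [if_neg h]
      rw [hf, hstep, ih]

theorem pv_inner_getD (ks : List String) (hnd : ks.Nodup) (q : String → Bool) (x : Int)
    (occ : PySem.Dict String (List Int)) (n : String) :
    (ks.foldl (fun occ k => if q k then occ.modify k [] (fun v => v ++ [x]) else occ) occ).getD n []
      = if n ∈ ks ∧ q n = true then occ.getD n [] ++ [x] else occ.getD n [] := by
  induction ks generalizing occ with
  | nil => simp
  | cons k ks ih =>
    rw [List.foldl_cons]
    have hnd' := List.nodup_cons.mp hnd
    by_cases hq : q k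
    · rw [if_pos hq, ih hnd'.2]
      by_cases hk : k = n
      · subst hk
        rw [if_neg (fun h => hnd'.1 h.1), PySem.Dict.getD_modify_self,
          if_pos ⟨List.mem_cons_self .., hq⟩]
      · rw [PySem.Dict.getD_modify_of_ne occ [] _ (fun h => hk h.symm)]
        by_cases hm : n ∈ ks ∧ q n = true
        · rw [if_pos hm, if_pos ⟨List.mem_cons_of_mem _ hm.1, hm.2⟩]
        · rw [if_neg hm, if_neg (fun hc => hm ⟨(List.mem_cons.mp hc.1).resolve_left (fun e => hk e.symm), hc.2⟩)]
    · rw [if_neg hq, ih hnd'.2]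
      by_cases hm : n ∈ ks ∧ q n = true
      · rw [if_pos hm, if_pos ⟨List.mem_cons_of_mem _ hm.1, hm.2⟩]
      · rw [if_neg hm, if_neg (fun hc => by
          rcases List.mem_cons.mp hc.1 with rfl | hmm
          · exact hq hc.2
          · exact hm ⟨hmm, hc.2⟩)]

theorem pv_inner_keys (ks : List String) (q : String → Bool) (x : Int)
    (occ : PySem.Dict String (List Int)) (hks : ∀ k ∈ ks, k ∈ occ.keys) :
    (ks.foldl (fun occ k => if q k then occ.modify k [] (fun v => v ++ [x]) else occ) occ).keys = occ.keys := by
  induction ks generalizing occ with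
  | nil => rfl
  | cons k ks ih =>
    rw [List.foldl_cons]
    have hk : k ∈ occ.keys := hks k (List.mem_cons_self ..)
    have hkeys : (if q k then occ.modify k [] (fun v => v ++ [x]) else occ).keys = occ.keys := by
      by_cases hq : q k
      · rw [if_pos hq, PySem.Dict.keys_modify,
          PySem.Dict.keys_insert_of_contains _ _ ((PySem.Dict.contains_iff_mem_keys _ _).mpr hk)]
      · rw [if_neg hq]
    rw [ih _ (by rw [hkeys]; exact fun k' h => hks k' (List.mem_cons_of_mem _ h)), hkeys]

theorem pv_occ_line_getD (occ : PySem.Dict String (List Int)) (il : Int × String) (n : String)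
    (hnd : occ.keys.Nodup) :
    (pvOccLineStep occ il).getD n []
      = if n ∈ occ.keys ∧ PySem.Str.isIn n il.2 = true then occ.getD n [] ++ [il.1] else occ.getD n [] := by
  exact pv_inner_getD _ hnd _ _ _ _

theorem pv_occ_line_keys (occ : PySem.Dict String (List Int)) (il : Int × String) :
    (pvOccLineStep occ il).keys = occ.keys := by
  exact pv_inner_keys _ _ _ _ (fun k h => h)

theorem pv_occ_fold_getD (l : List (Int × String)) (d : PySem.Dict String (List Int)) (n : String)
    (hnd : d.keys.Nodup) :
    (l.foldl pvOccLineStep d).getD n []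
      = d.getD n [] ++ (if n ∈ d.keys then (l.filter (fun il => PySem.Str.isIn n il.2)).map (·.1) else []) := by
  induction l generalizing d with
  | nil => simp
  | cons il rest ih =>
    rw [List.foldl_cons]
    have hkeys := pv_occ_line_keys d il
    have hnd' : (pvOccLineStep d il).keys.Nodup := by rw [hkeys]; exact hnd
    rw [ih _ hnd', hkeys, pv_occ_line_getD d il n hnd]
    by_cases hm : n ∈ d.keys
    · by_cases hq : PySem.Str.isIn n il.2
      · have hf : (il :: rest).filter (fun il => PySem.Str.isIn n il.2)
            = il :: rest.filter (fun il => PySem.Str.isIn n il.2) := by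
          simp only [List.filter_cons]; rw [if_pos hq]
        rw [if_pos ⟨hm, hq⟩, if_pos hm, if_pos hm, hf]
        simp
      · have hf : (il :: rest).filter (fun il => PySem.Str.isIn n il.2)
            = rest.filter (fun il => PySem.Str.isIn n il.2) := by
          simp only [List.filter_cons]; rw [if_neg hq]
        rw [if_neg (fun h => hq h.2), if_pos hm, if_pos hm, hf]
    · rw [if_neg (fun h => hm h.1), if_neg hm, if_neg hm]

theorem pv_occ0_nodup (l : List String) (d : PySem.Dict String (List Int)) (h : d.keys.Nodup) :
    (l.foldl pvNeedleStep d).keys.Nodup := by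
  induction l generalizing d with
  | nil => exact h
  | cons name rest ih =>
    rw [List.foldl_cons]
    apply ih
    unfold pvNeedleStep
    by_cases hc : PySem.Str.isIn ":" name
    · rw [if_pos hc]
      exact PySem.Dict.nodup_keys_insert _ _ _ (PySem.Dict.nodup_keys_insert _ _ _ h)
    · rw [if_neg hc]
      exact PySem.Dict.nodup_keys_insert _ _ _ h

theorem pv_occ0_getD (l : List String) (d : PySem.Dict String (List Int))
    (h : ∀ m, d.getD m [] = []) (n : String) : (l.foldl pvNeedleStep d).getD n [] = [] := by
  induction l generalizing d with
  | nil => exact h n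
  | cons name rest ih =>
    rw [List.foldl_cons]
    apply ih
    intro m
    unfold pvNeedleStep
    by_cases hc : PySem.Str.isIn ":" name
    · rw [if_pos hc, PySem.Dict.getD_insert, PySem.Dict.getD_insert]
      split_ifs <;> simp [h]
    · rw [if_neg hc, PySem.Dict.getD_insert]
      split_ifs <;> simp [h]

theorem pv_keys_mono (l : List String) (d : PySem.Dict String (List Int)) (x : String)
    (h : x ∈ d.keys) : x ∈ (l.foldl pvNeedleStep d).keys := by
  induction l generalizing d with
  | nil => exact h
  | cons name rest ih =>
    rw [List.foldl_cons]
    apply ih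
    unfold pvNeedleStep
    by_cases hc : PySem.Str.isIn ":" name
    · rw [if_pos hc]
      exact (PySem.Dict.mem_keys_insert _ _ _ _).mpr (Or.inr ((PySem.Dict.mem_keys_insert _ _ _ _).mpr (Or.inr h)))
    · rw [if_neg hc]
      exact (PySem.Dict.mem_keys_insert _ _ _ _).mpr (Or.inr h)

theorem pv_occ0_mem (l : List String) (d : PySem.Dict String (List Int)) (name : String)
    (h : name ∈ l) :
    pvPure name ∈ (l.foldl pvNeedleStep d).keys ∧
      (PySem.Str.isIn ":" name = true → name ∈ (l.foldl pvNeedleStep d).keys) := by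
  induction l generalizing d with
  | nil => cases h
  | cons hd rest ih =>
    rw [List.foldl_cons]
    rcases List.mem_cons.mp h with rfl | hmem
    · constructor
      · apply pv_keys_mono
        unfold pvNeedleStep
        by_cases hc : PySem.Str.isIn ":" name
        · rw [if_pos hc]
          exact (PySem.Dict.mem_keys_insert _ _ _ _).mpr (Or.inr ((PySem.Dict.mem_keys_insert _ _ _ _).mpr (Or.inl rfl)))
        · rw [if_neg hc]
          exact (PySem.Dict.mem_keys_insert _ _ _ _).mpr (Or.inl rfl)
      · intro hc
        apply pv_keys_mono
        unfold pvNeedleStep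
        rw [if_pos hc]
        exact (PySem.Dict.mem_keys_insert _ _ _ _).mpr (Or.inl rfl)
    · exact ih _ hmem

theorem pv_occF_getD (lines : List String) (kernel_names : List String) (n : String)
    (hmem : n ∈ (kernel_names.foldl pvNeedleStep PySem.Dict.empty).keys) :
    (((PySem.List.enumerate lines 0).foldl pvOccLineStep (kernel_names.foldl pvNeedleStep PySem.Dict.empty)).getD n [])
      = pvIdx lines n := by
  have hnd : (kernel_names.foldl pvNeedleStep PySem.Dict.empty).keys.Nodup :=
    pv_occ0_nodup kernel_names PySem.Dict.empty (by simp [PySem.Dict.keys_empty])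
  rw [pv_occ_fold_getD _ _ _ hnd, pv_occ0_getD kernel_names PySem.Dict.empty (fun m => PySem.Dict.getD_empty ..) n,
    if_pos hmem, List.nil_append]
  rfl

-- the per-kernel steps agree
theorem pv_step_eq (lines : List String) (kernel_names : List String) (run base : Int)
    (h0 : 0 ≤ run) (hle : run.toNat ≤ lines.length)
    (occ : PySem.Dict String (List Int))
    (hocc : ∀ n, n ∈ (kernel_names.foldl pvNeedleStep PySem.Dict.empty).keys → occ.getD n [] = pvIdx lines n)
    (name : String) (hname : name ∈ kernel_names) (d : PySem.Dict String (List Int)) :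
    pvKernelStepA lines run base d name = pvKernelStepB occ run base d name := by
  have hpure_mem := (pv_occ0_mem kernel_names PySem.Dict.empty name hname).1
  have hslice : PySem.List.slice lines (some run) none = lines.drop run.toNat :=
    PySem.List.slice_from lines h0
  have hfall : pvFoundDispatch lines run base name (pvPure name) d none
      = (if (pvHitsOf occ run base (pvPure name) none).isEmpty then d
          else d.insert name (d.getD name [] ++ pvHitsOf occ run base (pvPure name) none)) := by
    rw [pvFoundDispatch, pvHitsOf, hslice, pv_foldl_dict_append, hocc _ hpure_mem,
      pv_idx_filter lines _ run h0 hle, List.map_map]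
    rfl
  unfold pvKernelStepA pvKernelStepB
  cases hc : PySem.Str.isIn ":" name with
  | false =>
    simp only [Bool.false_eq_true, if_false]
    exact hfall
  | true =>
    simp only [if_true]
    have hname_mem := (pv_occ0_mem kernel_names PySem.Dict.empty name hname).2 hc
    have houter : (occ.getD name []).find? (fun i => decide (run ≤ i))
        = pvFindIdx (fun line => PySem.Str.isIn name line)
            (PySem.List.enumerate (PySem.List.slice lines (some run) none) run) := by
      rw [hocc _ hname_mem, pv_find?_eq, hslice, pv_scan_drop lines name run h0 hle]
    rw [houter]
    cases hh : pvFindIdx (fun line => PySem.Str.isIn name line)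
        (PySem.List.enumerate (PySem.List.slice lines (some run) none) run) with
    | none => rw [pvColonFound, pvColonHit]; exact hfall
    | some full =>
      rw [pvColonFound, pvColonHit]
      have hfm : full ∈ pvIdx lines name := by
        rw [hslice, pv_scan_drop lines name run h0 hle] at hh
        exact (List.mem_filter.mp (List.mem_of_mem_head? hh)).1
      have hfb := pv_idx_bounds lines name full hfm
      have h0' : (0 : Int) ≤ full + 1 := by omega
      have hle' : (full + 1).toNat ≤ lines.length := by omega
      have hprobe : (occ.getD (pvPure name) []).find? (fun i => decide (full < i))
          = pvFindIdx (fun line => PySem.Str.isIn (pvPure name) line)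
              (PySem.List.enumerate (PySem.List.slice lines (some (full + 1)) none) (full + 1)) := by
        rw [hocc _ hpure_mem, pv_find?_eq, PySem.List.slice_from lines h0',
          pv_scan_drop lines (pvPure name) (full + 1) h0' hle']
        have hfilt : (pvIdx lines (pvPure name)).filter (fun i => decide (full < i))
            = (pvIdx lines (pvPure name)).filter (fun i => decide (full + 1 ≤ i)) :=
          List.filter_congr (fun i _ => by simp only [decide_eq_decide]; omega)
        rw [hfilt]
      rw [hprobe]
      cases hj : pvFindIdx (fun line => PySem.Str.isIn (pvPure name) line)
          (PySem.List.enumerate (PySem.List.slice lines (some (full + 1)) none) (full + 1)) with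
      | none => simp only [Option.map_none]; exact hfall
      | some j =>
        simp only [Option.map_some]
        simp [pvFoundDispatch, pvHitsOf]

theorem pv_scan_none (p : String → Bool) (l : List (Int × String))
    (f : Option Int → (Int × String) → Option Int)
    (hf : ∀ s il, f s il = if s.isNone && p il.2 then some il.1 else s) :
    l.foldl f none = pvFindIdx p l := by
  rw [pv_scan_first p l none f hf]

-- ===== VERDICT =====
theorem build_python_kernel_to_lines_map_py_spec : Claim_equal_build_python_kernel_to_lines_map_py := by
  intro content kernel_names _
  unfold Spec_build_python_kernel_to_lines_map_py
  unfold build_python_kernel_to_lines_map_py build_python_kernel_to_lines_map_py_alt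
  dsimp only
  rw [pv_filter_lines]
  generalize PySem.Str.splitlines (PySem.Str.join "\n" (PySem.Str.splitlines content)) = lines
  by_cases hE : lines.isEmpty
  · rw [if_pos hE, if_pos hE]
  · rw [if_neg hE, if_neg hE, pv_split_st,
      pv_scan_none (fun line => PySem.Str.isIn "def" line && PySem.Str.isIn "call" line && PySem.Str.isIn "(args)" line)
        (PySem.List.enumerate lines 0) pvRunStep (fun s il => rfl),
      pv_scan_none (fun line => PySem.Str.isIn "# AOT ID:" line)
        (PySem.List.enumerate lines 0) pvBaseStep (fun s il => rfl)]
    apply congrArg PySem.Dict.items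
    apply PySem.List.foldl_congr_mem
    intro acc x hx
    exact pv_step_eq lines kernel_names _ _
      (pv_anchor_bounds lines _).1 (pv_anchor_bounds lines _).2
      _ (fun n hn => pv_occF_getD lines kernel_names n hn) x hx acc
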